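-- pv_equiv track=rewrite | github.com/zion928/-_-_- | util.py | value_to_tier_rank
-- ===== SOURCE A (Python) =====
-- def value_to_tier_rank(value: int) -> str:
--     # 각 티어의 값 범위를 딕셔너리로 정의합니다.
--     tier_values = {
--         'IRON': (0, 699),
--         'BRONZE': (700, 1499),
--         'SILVER': (1500, 2499),
--         'GOLD': (2500, 3999),
--         'PLATINUM': (4000, 5999),
--         'DIAMOND': (6000, 6999),
--         'MASTER': (7000, 7249),
--         'GRANDMASTER': (7250, 7499),
--         'CHALLENGER': (7500, float('inf')),
--     }
--
--     # 주어진 값에 해당하는 티어와 랭크를 찾습니다.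
--     for tier, value_range in tier_values.items():
--         if value_range[0] <= value <= value_range[1]:
--             rank_value = (value - value_range[0]) // 100
--             rank = {0: 'IV', 1: 'III', 2: 'II', 3: 'I'}.get(rank_value, '')
--             return f"{tier} {rank}"
--     return ""
-- ===== SOURCE B (Python) =====
-- def value_to_tier_rank(value: int) -> str:
--     # Binary search over a precomputed threshold table instead of a linear range scan.
--     if value < 0:
--         return ""
--     thresholds = [0, 700, 1500, 2500, 4000, 6000, 7000, 7250, 7500]
--     names = ['IRON', 'BRONZE', 'SILVER', 'GOLD', 'PLATINUM',
--              'DIAMOND', 'MASTER', 'GRANDMASTER', 'CHALLENGER']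
--     lo, hi = 0, len(thresholds)
--     while lo < hi:
--         mid = (lo + hi) // 2
--         if value < thresholds[mid]:
--             hi = mid
--         else:
--             lo = mid + 1
--     i = lo - 1
--     rank = {0: 'IV', 1: 'III', 2: 'II', 3: 'I'}.get((value - thresholds[i]) // 100, '')
--     return f"{names[i]} {rank}"
-- ===== Notes on version B (the rewrite author's own statement) =====
-- stated objective: alternative
-- what changed: Replaces the linear scan over a dict of (low,high) ranges with a binary search (hand-written bisect_right) over a sorted threshold table plus a parallel name list, with an explicit negative guard.
import Mathlib
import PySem

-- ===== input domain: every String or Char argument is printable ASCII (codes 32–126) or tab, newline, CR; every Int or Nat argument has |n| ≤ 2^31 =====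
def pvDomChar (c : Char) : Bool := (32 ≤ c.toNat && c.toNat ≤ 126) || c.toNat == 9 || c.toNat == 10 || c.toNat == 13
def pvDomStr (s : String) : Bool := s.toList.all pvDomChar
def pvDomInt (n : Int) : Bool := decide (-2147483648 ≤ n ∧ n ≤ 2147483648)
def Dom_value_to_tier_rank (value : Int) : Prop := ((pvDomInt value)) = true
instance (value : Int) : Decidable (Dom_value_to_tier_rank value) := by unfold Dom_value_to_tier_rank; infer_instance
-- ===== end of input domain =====

-- B replaces A's linear scan over a dict of (low, high) ranges by a binary search over
-- a sorted threshold table with a parallel name list (objective: alternative).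

-- ===== PORT A =====
-- rank = {0:'IV',1:'III',2:'II',3:'I'}.get(rank_value, '')
def pvRankA (rv : Int) : String :=
  PySem.Dict.getD (PySem.Dict.ofList [((0:Int),"IV"),(1,"III"),(2,"II"),(3,"I")]) rv ""

-- tier_values, in insertion order; CHALLENGER's upper bound float('inf') is represented
-- by `none` (for an int v, 'v <= float(\'inf\')' is always True, so this is exact)
def pvTiersA : List (String × Int × Option Int) :=
  [("IRON", 0, some 699), ("BRONZE", 700, some 1499), ("SILVER", 1500, some 2499),
   ("GOLD", 2500, some 3999), ("PLATINUM", 4000, some 5999), ("DIAMOND", 6000, some 6999),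
   ("MASTER", 7000, some 7249), ("GRANDMASTER", 7250, some 7499), ("CHALLENGER", 7500, none)]

-- 'value_range[0] <= value <= value_range[1]'
def pvInRange (v lo : Int) (hi : Option Int) : Bool :=
  decide (lo ≤ v) && (match hi with | some h => decide (v ≤ h) | none => true)

-- the for-loop over tier_values.items()
def pvLoopA (v : Int) : List (String × Int × Option Int) → String
  | [] => ""
  | (tier, lo, hi) :: rest =>
    if pvInRange v lo hi then
      tier ++ " " ++ pvRankA (PySem.Int.floordiv (v - lo) 100)
    else pvLoopA v rest

def value_to_tier_rank (value : Int) : String := pvLoopA value pvTiersA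

-- ===== PORT B =====
def pvThresholdsB : List Int := [0, 700, 1500, 2500, 4000, 6000, 7000, 7250, 7500]
def pvNamesB : List String :=
  ["IRON", "BRONZE", "SILVER", "GOLD", "PLATINUM", "DIAMOND", "MASTER", "GRANDMASTER", "CHALLENGER"]

-- the while-loop binary search; list indices are Nat and always in [0, len), so the
-- plain List.getD is exact for Python's thresholds[mid]
def pvBisect (v : Int) (lo hi : Nat) : Nat :=
  if lo < hi then
    -- mid = (lo + hi) // 2, written inline
    if v < pvThresholdsB.getD ((lo + hi) / 2) 0 then pvBisect v lo ((lo + hi) / 2)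
    else pvBisect v ((lo + hi) / 2 + 1) hi
  else lo
termination_by hi - lo
decreasing_by all_goals omega

def value_to_tier_rank_alt (value : Int) : String :=
  if value < 0 then ""
  else
    let i := pvBisect value 0 pvThresholdsB.length - 1
    let rank := PySem.Dict.getD (PySem.Dict.ofList [((0:Int),"IV"),(1,"III"),(2,"II"),(3,"I")])
                  (PySem.Int.floordiv (value - pvThresholdsB.getD i 0) 100) ""
    pvNamesB.getD i "" ++ " " ++ rank

-- ===== PRECONDITION & SPEC =====
def Spec_value_to_tier_rank (value : Int) (out : String) : Prop := out = value_to_tier_rank_alt value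
instance (value : Int) (out : String) : Decidable (Spec_value_to_tier_rank value out) := by unfold Spec_value_to_tier_rank; infer_instance

-- ===== CLAIM (what is proved, stated in full; the proofs are below) =====
def Claim_equal_value_to_tier_rank : Prop := ∀ (value : Int), Dom_value_to_tier_rank value → Spec_value_to_tier_rank value (value_to_tier_rank value)

-- ===== LEMMAS AND PROOFS =====
theorem pvIrF0 (lo : Int) {v : Int} {hi : Option Int} (h : ¬ lo ≤ v) :
    pvInRange v lo hi = false := by simp [pvInRange, h]

theorem pvIrF1 (b : Int) {v lo : Int} (h : ¬ v ≤ b) :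
    pvInRange v lo (some b) = false := by simp [pvInRange, h]

theorem pvIrT (lo b : Int) {v : Int} (h1 : lo ≤ v) (h2 : v ≤ b) :
    pvInRange v lo (some b) = true := by simp [pvInRange, h1, h2]

theorem pvIrTN (lo : Int) {v : Int} (h1 : lo ≤ v) :
    pvInRange v lo none = true := by simp [pvInRange, h1]

theorem pvLoopNil (v : Int) : pvLoopA v [] = "" := rfl

theorem pvLoopF {v lo : Int} {hi : Option Int} {t : String} {rest : List (String × Int × Option Int)}
    (h : pvInRange v lo hi = false) :
    pvLoopA v ((t, lo, hi) :: rest) = pvLoopA v rest := by simp [pvLoopA, h]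

theorem pvLoopT {v lo : Int} {hi : Option Int} {t : String} {rest : List (String × Int × Option Int)}
    (h : pvInRange v lo hi = true) :
    pvLoopA v ((t, lo, hi) :: rest) = t ++ " " ++ pvRankA (PySem.Int.floordiv (v - lo) 100) := by
  simp [pvLoopA, h]

theorem pvExitB (v : Int) (k : Nat) : pvBisect v k k = k := by
  conv_lhs => rw [pvBisect.eq_def]
  rw [if_neg (Nat.lt_irrefl k)]

theorem pvStepLt (lo hi mid : Nat) (t : Int) {v : Int} (hlt : lo < hi)
    (hm : (lo + hi) / 2 = mid) (ht : pvThresholdsB.getD mid 0 = t) (h : v < t) :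
    pvBisect v lo hi = pvBisect v lo mid := by
  subst ht
  conv_lhs => rw [pvBisect.eq_def]
  rw [hm, if_pos hlt, if_pos h]

theorem pvStepGe (lo hi mid : Nat) (t : Int) {v : Int} (hlt : lo < hi)
    (hm : (lo + hi) / 2 = mid) (ht : pvThresholdsB.getD mid 0 = t) (h : ¬ v < t) :
    pvBisect v lo hi = pvBisect v (mid + 1) hi := by
  subst ht
  conv_lhs => rw [pvBisect.eq_def]
  rw [hm, if_pos hlt, if_neg h]

-- ===== VERDICT (by name: the statement is the Claim_ definition above) =====
theorem value_to_tier_rank_spec : Claim_equal_value_to_tier_rank := by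
  intro v _
  unfold Spec_value_to_tier_rank
  have hcase : v < 0 ∨ (0 ≤ v ∧ v < 700) ∨ (700 ≤ v ∧ v < 1500) ∨ (1500 ≤ v ∧ v < 2500) ∨ (2500 ≤ v ∧ v < 4000) ∨ (4000 ≤ v ∧ v < 6000) ∨ (6000 ≤ v ∧ v < 7000) ∨ (7000 ≤ v ∧ v < 7250) ∨ (7250 ≤ v ∧ v < 7500) ∨ 7500 ≤ v := by omega
  rcases hcase with h|⟨h,h'⟩|⟨h,h'⟩|⟨h,h'⟩|⟨h,h'⟩|⟨h,h'⟩|⟨h,h'⟩|⟨h,h'⟩|⟨h,h'⟩|h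
  · simp only [value_to_tier_rank, value_to_tier_rank_alt, pvTiersA]
    rw [pvLoopF (pvIrF0 0 (by omega)), pvLoopF (pvIrF0 700 (by omega)), pvLoopF (pvIrF0 1500 (by omega)), pvLoopF (pvIrF0 2500 (by omega)), pvLoopF (pvIrF0 4000 (by omega)), pvLoopF (pvIrF0 6000 (by omega)), pvLoopF (pvIrF0 7000 (by omega)), pvLoopF (pvIrF0 7250 (by omega)), pvLoopF (pvIrF0 7500 (by omega)), pvLoopNil]
    rw [if_pos (show v < 0 by omega)]
  · simp only [value_to_tier_rank, value_to_tier_rank_alt, pvTiersA]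
    rw [pvLoopT (pvIrT 0 699 (by omega) (by omega))]
    rw [if_neg (show ¬ v < 0 by omega)]
    rw [show List.length pvThresholdsB = 9 from rfl]
    rw [pvStepLt 0 9 4 4000 (by omega) rfl rfl (by omega), pvStepLt 0 4 2 1500 (by omega) rfl rfl (by omega), pvStepLt 0 2 1 700 (by omega) rfl rfl (by omega), pvStepGe 0 1 0 0 (by omega) rfl rfl (by omega), pvExitB]
    rfl
  · simp only [value_to_tier_rank, value_to_tier_rank_alt, pvTiersA]
    rw [pvLoopF (pvIrF1 699 (by omega)), pvLoopT (pvIrT 700 1499 (by omega) (by omega))]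
    rw [if_neg (show ¬ v < 0 by omega)]
    rw [show List.length pvThresholdsB = 9 from rfl]
    rw [pvStepLt 0 9 4 4000 (by omega) rfl rfl (by omega), pvStepLt 0 4 2 1500 (by omega) rfl rfl (by omega), pvStepGe 0 2 1 700 (by omega) rfl rfl (by omega), pvExitB]
    rfl
  · simp only [value_to_tier_rank, value_to_tier_rank_alt, pvTiersA]
    rw [pvLoopF (pvIrF1 699 (by omega)), pvLoopF (pvIrF1 1499 (by omega)), pvLoopT (pvIrT 1500 2499 (by omega) (by omega))]
    rw [if_neg (show ¬ v < 0 by omega)]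
    rw [show List.length pvThresholdsB = 9 from rfl]
    rw [pvStepLt 0 9 4 4000 (by omega) rfl rfl (by omega), pvStepGe 0 4 2 1500 (by omega) rfl rfl (by omega), pvStepLt 3 4 3 2500 (by omega) rfl rfl (by omega), pvExitB]
    rfl
  · simp only [value_to_tier_rank, value_to_tier_rank_alt, pvTiersA]
    rw [pvLoopF (pvIrF1 699 (by omega)), pvLoopF (pvIrF1 1499 (by omega)), pvLoopF (pvIrF1 2499 (by omega)), pvLoopT (pvIrT 2500 3999 (by omega) (by omega))]
    rw [if_neg (show ¬ v < 0 by omega)]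
    rw [show List.length pvThresholdsB = 9 from rfl]
    rw [pvStepLt 0 9 4 4000 (by omega) rfl rfl (by omega), pvStepGe 0 4 2 1500 (by omega) rfl rfl (by omega), pvStepGe 3 4 3 2500 (by omega) rfl rfl (by omega), pvExitB]
    rfl
  · simp only [value_to_tier_rank, value_to_tier_rank_alt, pvTiersA]
    rw [pvLoopF (pvIrF1 699 (by omega)), pvLoopF (pvIrF1 1499 (by omega)), pvLoopF (pvIrF1 2499 (by omega)), pvLoopF (pvIrF1 3999 (by omega)), pvLoopT (pvIrT 4000 5999 (by omega) (by omega))]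
    rw [if_neg (show ¬ v < 0 by omega)]
    rw [show List.length pvThresholdsB = 9 from rfl]
    rw [pvStepGe 0 9 4 4000 (by omega) rfl rfl (by omega), pvStepLt 5 9 7 7250 (by omega) rfl rfl (by omega), pvStepLt 5 7 6 7000 (by omega) rfl rfl (by omega), pvStepLt 5 6 5 6000 (by omega) rfl rfl (by omega), pvExitB]
    rfl
  · simp only [value_to_tier_rank, value_to_tier_rank_alt, pvTiersA]
    rw [pvLoopF (pvIrF1 699 (by omega)), pvLoopF (pvIrF1 1499 (by omega)), pvLoopF (pvIrF1 2499 (by omega)), pvLoopF (pvIrF1 3999 (by omega)), pvLoopF (pvIrF1 5999 (by omega)), pvLoopT (pvIrT 6000 6999 (by omega) (by omega))]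
    rw [if_neg (show ¬ v < 0 by omega)]
    rw [show List.length pvThresholdsB = 9 from rfl]
    rw [pvStepGe 0 9 4 4000 (by omega) rfl rfl (by omega), pvStepLt 5 9 7 7250 (by omega) rfl rfl (by omega), pvStepLt 5 7 6 7000 (by omega) rfl rfl (by omega), pvStepGe 5 6 5 6000 (by omega) rfl rfl (by omega), pvExitB]
    rfl
  · simp only [value_to_tier_rank, value_to_tier_rank_alt, pvTiersA]
    rw [pvLoopF (pvIrF1 699 (by omega)), pvLoopF (pvIrF1 1499 (by omega)), pvLoopF (pvIrF1 2499 (by omega)), pvLoopF (pvIrF1 3999 (by omega)), pvLoopF (pvIrF1 5999 (by omega)), pvLoopF (pvIrF1 6999 (by omega)), pvLoopT (pvIrT 7000 7249 (by omega) (by omega))]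
    rw [if_neg (show ¬ v < 0 by omega)]
    rw [show List.length pvThresholdsB = 9 from rfl]
    rw [pvStepGe 0 9 4 4000 (by omega) rfl rfl (by omega), pvStepLt 5 9 7 7250 (by omega) rfl rfl (by omega), pvStepGe 5 7 6 7000 (by omega) rfl rfl (by omega), pvExitB]
    rfl
  · simp only [value_to_tier_rank, value_to_tier_rank_alt, pvTiersA]
    rw [pvLoopF (pvIrF1 699 (by omega)), pvLoopF (pvIrF1 1499 (by omega)), pvLoopF (pvIrF1 2499 (by omega)), pvLoopF (pvIrF1 3999 (by omega)), pvLoopF (pvIrF1 5999 (by omega)), pvLoopF (pvIrF1 6999 (by omega)), pvLoopF (pvIrF1 7249 (by omega)), pvLoopT (pvIrT 7250 7499 (by omega) (by omega))]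
    rw [if_neg (show ¬ v < 0 by omega)]
    rw [show List.length pvThresholdsB = 9 from rfl]
    rw [pvStepGe 0 9 4 4000 (by omega) rfl rfl (by omega), pvStepGe 5 9 7 7250 (by omega) rfl rfl (by omega), pvStepLt 8 9 8 7500 (by omega) rfl rfl (by omega), pvExitB]
    rfl
  · simp only [value_to_tier_rank, value_to_tier_rank_alt, pvTiersA]
    rw [pvLoopF (pvIrF1 699 (by omega)), pvLoopF (pvIrF1 1499 (by omega)), pvLoopF (pvIrF1 2499 (by omega)), pvLoopF (pvIrF1 3999 (by omega)), pvLoopF (pvIrF1 5999 (by omega)), pvLoopF (pvIrF1 6999 (by omega)), pvLoopF (pvIrF1 7249 (by omega)), pvLoopF (pvIrF1 7499 (by omega)), pvLoopT (pvIrTN 7500 (by omega))]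
    rw [if_neg (show ¬ v < 0 by omega)]
    rw [show List.length pvThresholdsB = 9 from rfl]
    rw [pvStepGe 0 9 4 4000 (by omega) rfl rfl (by omega), pvStepGe 5 9 7 7250 (by omega) rfl rfl (by omega), pvStepGe 8 9 8 7500 (by omega) rfl rfl (by omega), pvExitB]
    rfl
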